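-- pv_equiv track=rewrite | github.com/ekeilty17/Advent-of-Code | 2018/Day_06/part_1.py | is_manhattan_bounded
-- ===== SOURCE A (Python) =====
-- from typing import Tuple, Set, TypeAlias
--
-- Location: TypeAlias = Tuple[int, int]
--
-- def is_manhattan_bounded(locations: Set[Location], location: Location) -> bool:
--     x1, y1 = location
--     return (
--         any(x2 > x1 and abs(y2 - y1) <= abs(x2 - x1) for x2, y2 in locations)
--         and any(x2 < x1 and abs(y2 - y1) <= abs(x2 - x1) for x2, y2 in locations)
--         and any(y2 > y1 and abs(x2 - x1) <= abs(y2 - y1) for x2, y2 in locations)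
--         and any(y2 < y1 and abs(x2 - x1) <= abs(y2 - y1) for x2, y2 in locations)
--     )
-- ===== SOURCE B (Python) =====
-- from typing import Tuple, Set, TypeAlias
--
-- Location: TypeAlias = Tuple[int, int]
--
-- def is_manhattan_bounded(locations: Set[Location], location: Location) -> bool:
--     x1, y1 = location
--     right = left = up = down = False
--     for x2, y2 in locations:
--         dx, dy = abs(x2 - x1), abs(y2 - y1)
--         if dy <= dx:
--             if x2 > x1:
--                 right = True
--             elif x2 < x1:
--                 left = True
--         if dx <= dy:
--             if y2 > y1:
--                 up = True
--             elif y2 < y1: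
--                 down = True
--         if right and left and up and down:
--             return True
--     return right and left and up and down
-- ===== Notes on version B (the rewrite author's own statement) =====
-- stated objective: alternative
-- what changed: Replaces A's four separate short-circuiting any() scans over the set with one fused pass maintaining four directional flags, exiting early once all four are set.
import Mathlib
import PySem

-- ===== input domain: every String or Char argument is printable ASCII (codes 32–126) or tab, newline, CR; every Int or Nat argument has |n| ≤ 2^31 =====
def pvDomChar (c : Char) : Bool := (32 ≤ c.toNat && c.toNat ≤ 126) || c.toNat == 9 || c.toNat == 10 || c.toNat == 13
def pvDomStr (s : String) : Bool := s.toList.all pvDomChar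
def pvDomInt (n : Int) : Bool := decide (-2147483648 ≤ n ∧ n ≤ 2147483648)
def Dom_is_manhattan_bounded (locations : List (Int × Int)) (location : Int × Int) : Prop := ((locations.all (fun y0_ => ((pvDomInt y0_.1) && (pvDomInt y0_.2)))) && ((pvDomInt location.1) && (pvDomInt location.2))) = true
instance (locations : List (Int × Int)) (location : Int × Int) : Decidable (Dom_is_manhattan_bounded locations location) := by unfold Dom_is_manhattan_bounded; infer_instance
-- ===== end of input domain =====

-- B replaces A's four separate short-circuiting any() scans with one fused pass
-- maintaining four directional flags (with an early exit); objective: alternative decomposition.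

-- ===== PORT A =====
def is_manhattan_bounded (locations : List (Int × Int)) (location : Int × Int) : Bool :=
  let x1 := location.1
  let y1 := location.2
  (locations.any (fun p => decide (p.1 > x1) && decide (|p.2 - y1| ≤ |p.1 - x1|)))
  && (locations.any (fun p => decide (p.1 < x1) && decide (|p.2 - y1| ≤ |p.1 - x1|)))
  && (locations.any (fun p => decide (p.2 > y1) && decide (|p.1 - x1| ≤ |p.2 - y1|)))
  && (locations.any (fun p => decide (p.2 < y1) && decide (|p.1 - x1| ≤ |p.2 - y1|)))

-- ===== PORT B =====
-- the fused loop of Source B: four flags, updated per point, early return once all set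
def pvLoopB (x1 y1 : Int) : List (Int × Int) → Bool → Bool → Bool → Bool → Bool
  | [], r, l, u, d => r && l && u && d
  | (x2, y2) :: rest, r, l, u, d =>
    let dx := |x2 - x1|
    let dy := |y2 - y1|
    let rl : Bool × Bool :=
      if dy ≤ dx then
        if x2 > x1 then (true, l) else if x2 < x1 then (r, true) else (r, l)
      else (r, l)
    let ud : Bool × Bool :=
      if dx ≤ dy then
        if y2 > y1 then (true, d) else if y2 < y1 then (u, true) else (u, d)
      else (u, d)
    if rl.1 && rl.2 && ud.1 && ud.2 then true
    else pvLoopB x1 y1 rest rl.1 rl.2 ud.1 ud.2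

def is_manhattan_bounded_alt (locations : List (Int × Int)) (location : Int × Int) : Bool :=
  pvLoopB location.1 location.2 locations false false false false

-- ===== PRECONDITION & SPEC =====
def Spec_is_manhattan_bounded (locations : List (Int × Int)) (location : Int × Int) (out : Bool) : Prop := out = is_manhattan_bounded_alt locations location
instance (locations : List (Int × Int)) (location : Int × Int) (out : Bool) : Decidable (Spec_is_manhattan_bounded locations location out) := by unfold Spec_is_manhattan_bounded; infer_instance

-- ===== CLAIM (what is proved, stated in full; the proofs are below) =====
def Claim_equal_is_manhattan_bounded : Prop := ∀ (locations : List (Int × Int)) (location : Int × Int), Dom_is_manhattan_bounded locations location → Spec_is_manhattan_bounded locations location (is_manhattan_bounded locations location)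

-- ===== LEMMAS AND PROOFS =====

-- loop invariant: the fused loop computes the conjunction of flag-or-scan for each direction
theorem pvLoopB_eq (x1 y1 : Int) (xs : List (Int × Int)) :
    ∀ r l u d : Bool,
    pvLoopB x1 y1 xs r l u d =
      ((r || xs.any (fun p => decide (p.1 > x1) && decide (|p.2 - y1| ≤ |p.1 - x1|)))
      && (l || xs.any (fun p => decide (p.1 < x1) && decide (|p.2 - y1| ≤ |p.1 - x1|)))
      && (u || xs.any (fun p => decide (p.2 > y1) && decide (|p.1 - x1| ≤ |p.2 - y1|)))
      && (d || xs.any (fun p => decide (p.2 < y1) && decide (|p.1 - x1| ≤ |p.2 - y1|)))) := by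
  induction xs with
  | nil => intro r l u d; simp [pvLoopB]
  | cons hd tl ih =>
    intro r l u d
    obtain ⟨x2, y2⟩ := hd
    simp only [pvLoopB, List.any_cons]
    by_cases hdy : |y2 - y1| ≤ |x2 - x1| <;>
    by_cases hdx : |x2 - x1| ≤ |y2 - y1| <;>
    by_cases hx1 : x2 > x1 <;>
    by_cases hx2 : x2 < x1 <;>
    by_cases hy1 : y2 > y1 <;>
    by_cases hy2 : y2 < y1 <;>
    first
    | omega
    | (simp only [hdy, hdx, hx1, hx2, hy1, hy2, if_pos, if_neg, not_false_iff,
        decide_true, decide_false, ih]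
       cases r <;> cases l <;> cases u <;> cases d <;> rfl)

-- ===== VERDICT (by name: the statement is the Claim_ definition above) =====
theorem is_manhattan_bounded_spec : Claim_equal_is_manhattan_bounded := by
  intro locations location _
  unfold Spec_is_manhattan_bounded is_manhattan_bounded is_manhattan_bounded_alt
  rw [pvLoopB_eq]
  simp [Bool.and_assoc]
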